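-- pv_equiv track=rewrite | github.com/doobMM/hibari_tda | tda_pipeline/experiments/run_phase3_task38a_dft_gap0.py | replicate_inst2
-- ===== SOURCE A (Python) =====
-- MODULE_LEN = 32
--
-- N_INST2_COPIES = 32
--
-- INST2_INIT_OFFSET = 33
--
-- def replicate_inst2(module_notes: list[tuple[int, int, int]]) -> list[tuple[int, int, int]]:
--     out: list[tuple[int, int, int]] = []
--     period = MODULE_LEN + 1
--     for m in range(N_INST2_COPIES):
--         start = INST2_INIT_OFFSET + m * period
--         for s, p, e in module_notes:
--             ns = s + start
--             ne = min(e + start, start + MODULE_LEN)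
--             if ns < start + MODULE_LEN and ne > ns:
--                 out.append((ns, p, ne))
--     return out
-- ===== SOURCE B (Python) =====
-- MODULE_LEN = 32
--
-- N_INST2_COPIES = 32
--
-- INST2_INIT_OFFSET = 33
--
-- def replicate_inst2(module_notes: list[tuple[int, int, int]]) -> list[tuple[int, int, int]]:
--     # Precompute the loop-invariant template once: clamp ends to the module
--     # window and drop notes that fall outside it, in module-local coordinates.
--     template = []
--     for s, p, e in module_notes:
--         ce = min(e, MODULE_LEN)
--         if s < MODULE_LEN and ce > s:
--             template.append((s, p, ce))
--     period = MODULE_LEN + 1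
--     out = []
--     for m in range(N_INST2_COPIES):
--         start = INST2_INIT_OFFSET + m * period
--         out.extend((s + start, p, ce + start) for s, p, ce in template)
--     return out
-- ===== Notes on version B (the rewrite author's own statement) =====
-- stated objective: faster
-- what changed: B filters and clamps the notes once into a module-local template, then each of the 32 copies is a plain shift-and-append of that template, instead of re-testing and re-clamping every note inside every copy.
import Mathlib
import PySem

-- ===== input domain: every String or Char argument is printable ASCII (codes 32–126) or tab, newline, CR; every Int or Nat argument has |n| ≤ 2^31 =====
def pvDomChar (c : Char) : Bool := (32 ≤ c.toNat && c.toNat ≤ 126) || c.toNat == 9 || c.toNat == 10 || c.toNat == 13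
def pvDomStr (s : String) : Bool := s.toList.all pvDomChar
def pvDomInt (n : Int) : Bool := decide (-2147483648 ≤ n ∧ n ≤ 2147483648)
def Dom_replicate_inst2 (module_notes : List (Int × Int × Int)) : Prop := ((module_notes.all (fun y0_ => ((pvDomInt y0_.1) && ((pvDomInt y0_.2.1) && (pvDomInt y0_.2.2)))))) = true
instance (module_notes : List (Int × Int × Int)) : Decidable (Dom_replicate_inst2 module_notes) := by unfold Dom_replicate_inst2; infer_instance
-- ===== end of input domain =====

-- B precomputes the filtered/clamped template once and shifts it per copy (faster by a constant factor); return value proved equal to A's.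


-- ===== PORT A =====
def replicate_inst2 (module_notes : List (Int × Int × Int)) : List (Int × Int × Int) :=
  let period : Int := 32 + 1
  (PySem.List.pyRange 0 32 1).foldl (fun out m =>
    let start : Int := 33 + m * period
    module_notes.foldl (fun out t =>
      let ns := t.1 + start
      let ne := min (t.2.2 + start) (start + 32)
      if ns < start + 32 ∧ ne > ns then out ++ [(ns, t.2.1, ne)] else out) out) []

-- ===== PORT B =====
def replicate_inst2_alt (module_notes : List (Int × Int × Int)) : List (Int × Int × Int) :=
  let template := module_notes.foldl (fun tpl t =>
    let ce := min t.2.2 32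
    if t.1 < 32 ∧ ce > t.1 then tpl ++ [(t.1, t.2.1, ce)] else tpl) []
  let period : Int := 32 + 1
  (PySem.List.pyRange 0 32 1).foldl (fun out m =>
    let start : Int := 33 + m * period
    out ++ template.map (fun t => (t.1 + start, t.2.1, t.2.2 + start))) []

-- ===== PRECONDITION & SPEC =====
def Spec_replicate_inst2 (module_notes : List (Int × Int × Int)) (out : List (Int × Int × Int)) : Prop := out = replicate_inst2_alt module_notes
instance (module_notes : List (Int × Int × Int)) (out : List (Int × Int × Int)) : Decidable (Spec_replicate_inst2 module_notes out) := by unfold Spec_replicate_inst2; infer_instance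

-- ===== CLAIM (what is proved, stated in full; the proofs are below) =====
def Claim_equal_replicate_inst2 : Prop := ∀ (module_notes : List (Int × Int × Int)), Dom_replicate_inst2 module_notes → Spec_replicate_inst2 module_notes (replicate_inst2 module_notes)

-- ===== LEMMAS AND PROOFS =====

-- named step functions (definitionally equal to the ports' lambdas, kept opaque for induction)
def pvTplStep (tpl : List (Int × Int × Int)) (t : Int × Int × Int) : List (Int × Int × Int) :=
  if t.1 < 32 ∧ min t.2.2 32 > t.1 then tpl ++ [(t.1, t.2.1, min t.2.2 32)] else tpl

def pvTemplate (notes : List (Int × Int × Int)) : List (Int × Int × Int) :=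
  notes.foldl pvTplStep []

def pvShiftStep (start : Int) (out : List (Int × Int × Int)) (t : Int × Int × Int) : List (Int × Int × Int) :=
  if t.1 + start < start + 32 ∧ min (t.2.2 + start) (start + 32) > t.1 + start
  then out ++ [(t.1 + start, t.2.1, min (t.2.2 + start) (start + 32))] else out

theorem pvTemplate_acc (notes : List (Int × Int × Int)) (acc : List (Int × Int × Int)) :
    notes.foldl pvTplStep acc = acc ++ pvTemplate notes := by
  induction notes generalizing acc with
  | nil => simp [pvTemplate]
  | cons t ts ih =>
    simp only [pvTemplate, List.foldl_cons]
    rw [ih, ih (pvTplStep [] t)]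
    unfold pvTplStep
    split_ifs <;> simp

-- A's inner loop over the notes equals appending the shifted template
theorem pvInner (notes : List (Int × Int × Int)) (start : Int) (acc : List (Int × Int × Int)) :
    notes.foldl (pvShiftStep start) acc
    = acc ++ (pvTemplate notes).map (fun t => (t.1 + start, t.2.1, t.2.2 + start)) := by
  induction notes generalizing acc with
  | nil => simp [pvTemplate]
  | cons t ts ih =>
    simp only [List.foldl_cons]
    rw [ih]
    have htpl : pvTemplate (t :: ts) = pvTplStep [] t ++ pvTemplate ts := by
      simp only [pvTemplate, List.foldl_cons]; exact pvTemplate_acc ts (pvTplStep [] t)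
    rw [htpl]
    have hmin : min (t.2.2 + start) (start + 32) = min t.2.2 32 + start := by omega
    by_cases h : t.1 < 32 ∧ min t.2.2 32 > t.1
    · have h' : t.1 + start < start + 32 ∧ min (t.2.2 + start) (start + 32) > t.1 + start :=
        ⟨by omega, by omega⟩
      simp [pvShiftStep, pvTplStep, h, h', hmin]
    · have h' : ¬ (t.1 + start < start + 32 ∧ min (t.2.2 + start) (start + 32) > t.1 + start) := by
        rw [hmin]; intro hc; exact h ⟨by omega, by omega⟩
      unfold pvShiftStep pvTplStep
      rw [if_neg h', if_neg h]
      simp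

theorem pvOuter (notes : List (Int × Int × Int)) (ms : List Int) (acc : List (Int × Int × Int)) :
    ms.foldl (fun out m => notes.foldl (pvShiftStep (33 + m * (32 + 1))) out) acc
    = ms.foldl (fun out m =>
        out ++ (pvTemplate notes).map
          (fun t => (t.1 + (33 + m * (32 + 1)), t.2.1, t.2.2 + (33 + m * (32 + 1))))) acc := by
  induction ms generalizing acc with
  | nil => rfl
  | cons m ms ih =>
    simp only [List.foldl_cons]
    rw [pvInner, ih]

-- ===== VERDICT (by name: the statement is the Claim_ definition above) =====
theorem replicate_inst2_spec : Claim_equal_replicate_inst2 := by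
  intro notes _
  show replicate_inst2 notes = replicate_inst2_alt notes
  exact pvOuter notes (PySem.List.pyRange 0 32 1) []
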